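-- pv_equiv track=rewrite | github.com/hyunlord/extract_logic | scripts/extractors/gdscript_formulas.py | _collect_comment_context
-- ===== SOURCE A (Python) =====
-- def _collect_comment_context(lines: list[str], start_idx: int) -> str:
--     comments: list[str] = []
--     idx = start_idx - 1
--     while idx >= 0:
--         stripped = lines[idx].strip()
--         if stripped.startswith("#"):
--             comments.append(stripped.lstrip("#").strip())
--             idx -= 1
--             continue
--         if not stripped:
--             idx -= 1
--             continue
--         break
--     comments.reverse()
--     return " ".join(c for c in comments if c)
-- ===== SOURCE B (Python) =====
-- def _collect_comment_context(lines: list[str], start_idx: int) -> str: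
--     # Find the lower boundary of the blank/comment block just above start_idx,
--     # then collect the comment texts in one forward pass (no reverse needed).
--     b = start_idx
--     while b > 0:
--         s = lines[b - 1].strip()
--         if s and not s.startswith("#"):
--             break
--         b -= 1
--     comments = (line.strip().lstrip("#").strip()
--                 for line in lines[b:start_idx]
--                 if line.strip().startswith("#"))
--     return " ".join(c for c in comments if c)
-- ===== Notes on version B (the rewrite author's own statement) =====
-- stated objective: alternative
-- what changed: Replaces the single backward scan that interleaves collecting, cleaning and blank-skipping (plus a final reverse) with two passes: a backward boundary search that only finds where the blank/comment block starts, then a forward generator over the slice that filters and cleans the comment lines in output order, so no reverse is needed.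
import Mathlib
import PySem

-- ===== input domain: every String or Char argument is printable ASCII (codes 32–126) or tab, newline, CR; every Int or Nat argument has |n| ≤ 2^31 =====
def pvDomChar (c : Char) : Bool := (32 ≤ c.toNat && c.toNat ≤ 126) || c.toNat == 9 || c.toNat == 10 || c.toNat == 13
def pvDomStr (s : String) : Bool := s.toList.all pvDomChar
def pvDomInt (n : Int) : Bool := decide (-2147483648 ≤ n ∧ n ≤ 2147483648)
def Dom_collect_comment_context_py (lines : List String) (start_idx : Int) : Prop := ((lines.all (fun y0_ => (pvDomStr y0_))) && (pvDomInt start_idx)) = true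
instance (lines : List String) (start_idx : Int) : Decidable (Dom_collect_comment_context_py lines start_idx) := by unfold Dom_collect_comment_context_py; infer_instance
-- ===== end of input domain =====

-- B replaces A's backward collect-and-reverse loop by a backward boundary search plus a
-- forward filtering pass over the slice (alternative decomposition, same cost).


-- ===== PORT A =====
-- s.lstrip("#"): drop leading '#' characters (exact for this single-character argument)
def pvLstripHash (s : String) : String := String.ofList (s.toList.dropWhile (· == '#'))

-- A's `while idx >= 0` loop, carrying the `comments` list in Python's append order
def pvALoop (lines : List String) (idx : Int) (acc : List String) : List String :=
  if 0 ≤ idx then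
    match PySem.List.pyGet? lines idx with
    | none => acc  -- Python raises IndexError here; Pre_ excludes these inputs
    | some line =>
      let stripped := PySem.Str.strip line
      if PySem.Str.startswith stripped "#" then
        pvALoop lines (idx - 1) (acc ++ [PySem.Str.strip (pvLstripHash stripped)])
      else if stripped == "" then
        pvALoop lines (idx - 1) acc
      else acc
  else acc
termination_by (idx + 1).toNat
decreasing_by all_goals omega

def collect_comment_context_py (lines : List String) (start_idx : Int) : String :=
  let comments := pvALoop lines (start_idx - 1) []
  PySem.Str.join " " ((comments.reverse).filter (fun c => !(c == "")))

-- ===== PORT B =====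
-- B's boundary loop: the lowest b such that every line of lines[b:start] is blank or a comment
def pvBBound (lines : List String) (b : Int) : Int :=
  if 0 < b then
    match PySem.List.pyGet? lines (b - 1) with
    | none => b  -- Python raises IndexError here; Pre_ excludes these inputs
    | some line =>
      let s := PySem.Str.strip line
      if !(s == "") && !(PySem.Str.startswith s "#") then b
      else pvBBound lines (b - 1)
  else b
termination_by b.toNat
decreasing_by all_goals omega

-- B's per-line comment filter/cleaner (the generator expression's body)
def pvCleanLine (line : String) : Option String :=
  let s := PySem.Str.strip line
  if PySem.Str.startswith s "#" then some (PySem.Str.strip (pvLstripHash s)) else none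

def collect_comment_context_py_alt (lines : List String) (start_idx : Int) : String :=
  let b := pvBBound lines start_idx
  let comments := (PySem.List.slice lines (some b) (some start_idx)).filterMap pvCleanLine
  PySem.Str.join " " (comments.filter (fun c => !(c == "")))

-- ===== PRECONDITION & SPEC =====
-- A indexes lines[start_idx-1] unconditionally when start_idx > 0, so it raises IndexError
-- exactly when start_idx > len(lines) (B raises there too); Pre_ excludes those inputs only.
def Pre_collect_comment_context_py (lines : List String) (start_idx : Int) : Prop :=
  start_idx ≤ (lines.length : Int)
instance (lines : List String) (start_idx : Int) : Decidable (Pre_collect_comment_context_py lines start_idx) := by unfold Pre_collect_comment_context_py; infer_instance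

def pvWitness_collect_comment_context_py : List String × Int := (["# a", "", "# b", "x"], 3)

def Spec_collect_comment_context_py (lines : List String) (start_idx : Int) (out : String) : Prop := out = collect_comment_context_py_alt lines start_idx
instance (lines : List String) (start_idx : Int) (out : String) : Decidable (Spec_collect_comment_context_py lines start_idx out) := by unfold Spec_collect_comment_context_py; infer_instance

-- ===== CLAIM (what is proved, stated in full; the proofs are below) =====
def Claim_equal_collect_comment_context_py : Prop := ∀ (lines : List String) (start_idx : Int), Dom_collect_comment_context_py lines start_idx → Pre_collect_comment_context_py lines start_idx → Spec_collect_comment_context_py lines start_idx (collect_comment_context_py lines start_idx)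

-- ===== LEMMAS AND PROOFS =====

-- the accumulator of A's loop factors out
lemma pvALoop_acc (lines : List String) (idx : Int) (acc : List String) :
    pvALoop lines idx acc = acc ++ pvALoop lines idx [] := by
  generalize hk : (idx + 1).toNat = k
  induction k using Nat.strong_induction_on generalizing idx acc with
  | _ k IH =>
    subst hk
    conv_lhs => rw [pvALoop]
    conv_rhs => rw [pvALoop]
    by_cases h : 0 ≤ idx
    · simp only [if_pos h]
      cases hg : PySem.List.pyGet? lines idx with
      | none => simp
      | some line =>
        simp only
        split_ifs with h1 h2
        · have e1 := IH ((idx - 1) + 1).toNat (by omega) (idx - 1) (acc ++ [PySem.Str.strip (pvLstripHash (PySem.Str.strip line))]) rfl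
          have e2 := IH ((idx - 1) + 1).toNat (by omega) (idx - 1) [PySem.Str.strip (pvLstripHash (PySem.Str.strip line))] rfl
          simp [e1, e2]
        · rw [IH _ (by omega) (idx - 1) acc rfl]
        · simp
    · simp [h]

lemma pvBBound_bounds (lines : List String) (b : Int) (hb : 0 ≤ b) :
    0 ≤ pvBBound lines b ∧ pvBBound lines b ≤ b := by
  generalize hk : b.toNat = k
  induction k using Nat.strong_induction_on generalizing b with
  | _ k IH =>
    subst hk
    rw [pvBBound]
    by_cases h : 0 < b
    · simp only [if_pos h]
      cases hg : PySem.List.pyGet? lines (b - 1) with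
      | none => simp only; omega
      | some line =>
        simp only
        split_ifs with h1
        · omega
        · have := IH (b - 1).toNat (by omega) (b - 1) (by omega) rfl
          omega
    · simp only [if_neg h]; omega

lemma pvSlice_self {α : Type} (xs : List α) (a : Int) :
    PySem.List.slice xs (some a) (some a) = [] := by
  apply List.eq_nil_of_length_eq_zero
  rw [PySem.List.length_slice]
  omega

lemma pvSlice_snoc (xs : List String) (a : Int) (n : Nat) (ha : 0 ≤ a) (han : a ≤ (n : Int))
    (hn : n < xs.length) :
    PySem.List.slice xs (some a) (some ((n : Int) + 1))
      = PySem.List.slice xs (some a) (some (n : Int)) ++ [xs[n]] := by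
  rw [PySem.List.slice_toNat _ ha (by omega), PySem.List.slice_toNat _ ha (by omega)]
  have h1 : ((n : Int) + 1).toNat = n + 1 := by omega
  have h2 : ((n : Int)).toNat = n := by omega
  rw [h1, h2]
  have h3 : n + 1 - a.toNat = (n - a.toNat) + 1 := by omega
  rw [h3, List.take_add_one]
  congr 1
  have h4 : (xs.drop a.toNat)[n - a.toNat]? = xs[a.toNat + (n - a.toNat)]? := by
    simp [List.getElem?_drop]
  rw [h4, show a.toNat + (n - a.toNat) = n by omega, List.getElem?_eq_getElem hn]
  simp

-- main invariant: A's collected list, reversed, equals B's forward pass over the block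
lemma pvMain (lines : List String) (n : Nat) (h : n ≤ lines.length) :
    (pvALoop lines ((n : Int) - 1) []).reverse
      = (PySem.List.slice lines (some (pvBBound lines (n : Int))) (some (n : Int))).filterMap pvCleanLine := by
  induction n with
  | zero =>
    rw [pvALoop, pvBBound]
    norm_num [pvSlice_self]
  | succ n IH =>
    have hn : n < lines.length := by omega
    have hcast : ((n + 1 : Nat) : Int) - 1 = (n : Int) := by push_cast; ring
    have hget : PySem.List.pyGet? lines (n : Int) = some lines[n] := by
      rw [PySem.List.pyGet?_natCast, List.getElem?_eq_getElem hn]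
    conv_lhs => rw [hcast, pvALoop]
    conv_rhs => rw [pvBBound]
    have hpos : (0:Int) < ((n+1:Nat):Int) := by positivity
    have hidx : ((n+1:Nat):Int) - 1 = (n:Int) := hcast
    rw [if_pos hpos, hidx, hget]
    simp only
    have hb := pvBBound_bounds lines (n : Int) (by positivity)
    have hc1 : ((n + 1 : Nat) : Int) = (n : Int) + 1 := by push_cast; ring
    by_cases h1 : PySem.Str.startswith (PySem.Str.strip lines[n]) "#" = true
    · rw [if_pos h1]
      simp only [h1, Bool.not_true, Bool.and_false, Bool.false_eq_true, if_false]
      rw [hc1, pvSlice_snoc lines _ n hb.1 hb.2 hn, List.filterMap_append]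
      rw [pvALoop_acc]
      have h1' : PySem.Chars.startswith (PySem.Chars.strip lines[n].toList) ['#'] = true := by
        simpa [PySem.Str.startswith, PySem.Str.strip] using h1
      simp [pvCleanLine, h1', IH (by omega)]
    · rw [if_neg h1]
      by_cases h2 : (PySem.Str.strip lines[n] == "") = true
      · rw [if_pos h2]
        simp only [h2, Bool.not_true, Bool.false_and, Bool.false_eq_true, if_false]
        rw [hc1, pvSlice_snoc lines _ n hb.1 hb.2 hn, List.filterMap_append]
        have h1' : PySem.Chars.startswith (PySem.Chars.strip lines[n].toList) ['#'] = false := by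
          simpa [PySem.Str.startswith, PySem.Str.strip] using h1
        simp [pvCleanLine, h1', IH (by omega)]
      · rw [if_neg h2]
        have hcond : (!(PySem.Str.strip lines[n] == "") && !(PySem.Str.startswith (PySem.Str.strip lines[n]) "#")) = true := by
          simp only [Bool.and_eq_true, Bool.not_eq_true']
          constructor
          · simpa using h2
          · simpa using h1
        rw [if_pos hcond]
        rw [pvSlice_self]
        simp

-- ===== VERDICT (by name: the statement is the Claim_ definition above) =====
theorem collect_comment_context_py_spec : Claim_equal_collect_comment_context_py := by
  intro lines start_idx _hdom hpre
  unfold Pre_collect_comment_context_py at hpre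
  unfold Spec_collect_comment_context_py
  unfold collect_comment_context_py collect_comment_context_py_alt
  dsimp only
  by_cases h : 0 ≤ start_idx
  · obtain ⟨n, rfl⟩ : ∃ n : Nat, start_idx = (n : Int) := ⟨start_idx.toNat, (Int.toNat_of_nonneg h).symm⟩
    rw [pvMain lines n (by exact_mod_cast hpre)]
  · have hA : pvALoop lines (start_idx - 1) [] = [] := by
      rw [pvALoop, if_neg (by omega)]
    have hB : pvBBound lines start_idx = start_idx := by
      rw [pvBBound, if_neg (by omega)]
    rw [hA, hB, pvSlice_self]
    simp
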